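-- pv_equiv track=rewrite | github.com/adc3k-scott/gpu-learning-lab | scripts/produce_episode.py | parse_stories
-- ===== SOURCE A (Python) =====
-- def parse_stories(briefing_text, max_stories=5):
--     """Extract top stories from briefing."""
--     stories = []
--     current = None
--     for line in briefing_text.split("\n"):
--         if line.startswith("### ") and ". " in line:
--             if current:
--                 stories.append(current)
--             title = line.replace("### ", "").strip()
--             if title[0].isdigit() and ". " in title:
--                 title = title.split(". ", 1)[1]
--             current = {"title": title, "body": "", "relevance": ""}
--         elif current and line.startswith("**ADC RELEVANCE:"):
--             current["relevance"] = line.split("**")[2].strip().strip("-").strip()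
--         elif current and not line.startswith("**ACTION") and not line.startswith("**Source:"):
--             if line.strip():
--                 current["body"] += line.strip() + " "
--     if current:
--         stories.append(current)
--     return stories[:max_stories]
-- ===== SOURCE B (Python) =====
-- def parse_stories(briefing_text, max_stories=5):
--     """Extract top stories from briefing (two-pass: split into blocks, then convert)."""
--
--     def is_header(line):
--         return line.startswith("### ") and ". " in line
--
--     # Pass 1: group the lines into story blocks; lines before the first header are dropped.
--     blocks = []
--     for line in briefing_text.split("\n"):
--         if is_header(line):
--             blocks.append([line])
--         elif blocks:
--             blocks[-1].append(line)
--
--     # Pass 2: turn each of the first max_stories blocks into a story dict.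
--     def to_story(block):
--         header, rest = block[0], block[1:]
--         title = header.replace("### ", "").strip()
--         if title[0].isdigit() and ". " in title:
--             title = title.split(". ", 1)[1]
--         relevance = ""
--         parts = []
--         for line in rest:
--             if line.startswith("**ADC RELEVANCE:"):
--                 relevance = line.split("**")[2].strip().strip("-").strip()
--             elif not line.startswith("**ACTION") and not line.startswith("**Source:"):
--                 if line.strip():
--                     parts.append(line.strip() + " ")
--         return {"title": title, "body": "".join(parts), "relevance": relevance}
--
--     return [to_story(b) for b in blocks[:max_stories]]
-- ===== Notes on version B (the rewrite author's own statement) =====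
-- stated objective: alternative
-- what changed: A builds the result in one stateful line loop that mutates a 'current' dict; B makes two passes: it first groups the lines into story blocks (a new block per header line, pre-header lines dropped), then converts each of the first max_stories blocks independently into its dict.
import Mathlib
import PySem

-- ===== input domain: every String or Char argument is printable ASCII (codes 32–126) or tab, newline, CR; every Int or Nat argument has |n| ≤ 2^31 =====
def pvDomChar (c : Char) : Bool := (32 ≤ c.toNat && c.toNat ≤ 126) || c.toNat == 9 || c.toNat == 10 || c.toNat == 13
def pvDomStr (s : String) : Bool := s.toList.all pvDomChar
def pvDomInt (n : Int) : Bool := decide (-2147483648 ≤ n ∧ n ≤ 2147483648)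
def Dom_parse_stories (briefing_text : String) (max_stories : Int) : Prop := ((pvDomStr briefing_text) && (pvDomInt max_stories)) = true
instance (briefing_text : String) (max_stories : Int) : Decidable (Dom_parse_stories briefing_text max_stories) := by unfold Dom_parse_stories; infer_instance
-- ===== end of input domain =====

-- B re-decomposes A's single stateful line loop into two passes (group lines into story
-- blocks, then convert each kept block); same return value; objective: alternative decomposition.

-- ===== PORT A =====
-- title[0] cannot raise IndexError here: a header line contains ". ", and '.' survives
-- replace/strip, so title is never empty; the port still reads it as an Option.
def pvTitleA (line : String) : String :=
  let title := PySem.Str.strip (PySem.Str.replace line "### " "")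
  if (PySem.Str.pyGet? title 0).elim false PySem.Chars.isdigit && PySem.Str.isIn ". " title then
    ((PySem.Str.splitMax? title ". " 1).getD []).getD 1 title
  else title

-- line.split("**")[2] raises IndexError when the line has fewer than two "**"; those inputs
-- are excluded by Pre_parse_stories; the port reads the missing element with getD "".
def pvRelA (line : String) : String :=
  PySem.Str.strip (PySem.Str.stripChars (PySem.Str.strip (((PySem.Str.split? line "**").getD []).getD 2 "")) "-")

def pvStepA (st : List (PySem.Dict String String) × Option (PySem.Dict String String))
    (line : String) : List (PySem.Dict String String) × Option (PySem.Dict String String) :=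
  if PySem.Str.startswith line "### " && PySem.Str.isIn ". " line then
    let stories := match st.2 with | some c => st.1 ++ [c] | none => st.1
    (stories, some (((PySem.Dict.empty.insert "title" (pvTitleA line)).insert "body" "").insert "relevance" ""))
  else
    match st.2 with
    | none => st
    | some cur =>
      if PySem.Str.startswith line "**ADC RELEVANCE:" then
        (st.1, some (cur.insert "relevance" (pvRelA line)))
      else if !PySem.Str.startswith line "**ACTION" && !PySem.Str.startswith line "**Source:" then
        if PySem.Str.strip line ≠ "" then
          (st.1, some (cur.insert "body" (cur.getD "body" "" ++ (PySem.Str.strip line ++ " "))))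
        else st
      else st

def parse_stories (briefing_text : String) (max_stories : Int) : List (List (String × String)) :=
  let fin := ((PySem.Str.split? briefing_text "\n").getD []).foldl pvStepA ([], none)
  let stories := match fin.2 with | some c => fin.1 ++ [c] | none => fin.1
  (PySem.List.slice stories none (some max_stories)).map PySem.Dict.items

-- ===== PORT B =====
def pvIsHeader (line : String) : Bool :=
  PySem.Str.startswith line "### " && PySem.Str.isIn ". " line

def pvAddLine (blocks : List (List String)) (line : String) : List (List String) :=
  if pvIsHeader line then blocks ++ [[line]]
  else if blocks.isEmpty then blocks
  else blocks.dropLast ++ [(blocks.getLast?.getD []) ++ [line]]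

def pvTitleB (header : String) : String :=
  let title := PySem.Str.strip (PySem.Str.replace header "### " "")
  if (PySem.Str.pyGet? title 0).elim false PySem.Chars.isdigit && PySem.Str.isIn ". " title then
    ((PySem.Str.splitMax? title ". " 1).getD []).getD 1 title
  else title

def pvRelB (line : String) : String :=
  PySem.Str.strip (PySem.Str.stripChars (PySem.Str.strip (((PySem.Str.split? line "**").getD []).getD 2 ""))  "-")

def pvClassify (st : String × List String) (line : String) : String × List String :=
  if PySem.Str.startswith line "**ADC RELEVANCE:" then (pvRelB line, st.2)
  else if !PySem.Str.startswith line "**ACTION" && !PySem.Str.startswith line "**Source:" then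
    if PySem.Str.strip line ≠ "" then (st.1, st.2 ++ [PySem.Str.strip line ++ " "]) else st
  else st

def pvToStory (block : List String) : List (String × String) :=
  match block with
  | [] => []
  | header :: rest =>
    let rp := rest.foldl pvClassify ("", [])
    [("title", pvTitleB header), ("body", PySem.Str.join "" rp.2), ("relevance", rp.1)]

def parse_stories_alt (briefing_text : String) (max_stories : Int) : List (List (String × String)) :=
  let blocks := ((PySem.Str.split? briefing_text "\n").getD []).foldl pvAddLine []
  (PySem.List.slice blocks none (some max_stories)).map pvToStory

-- ===== PRECONDITION & SPEC =====
-- Pre_ excludes exactly the inputs on which Python A raises IndexError: a line that starts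
-- with "**ADC RELEVANCE:" but contains fewer than two "**", appearing after some header line.
def Pre_parse_stories (briefing_text : String) (max_stories : Int) : Prop :=
  ∀ i : Fin ((PySem.Str.split? briefing_text "\n").getD []).length,
    ∀ j : Fin ((PySem.Str.split? briefing_text "\n").getD []).length,
      (i : Nat) < (j : Nat) →
      (PySem.Str.startswith (((PySem.Str.split? briefing_text "\n").getD []).get i) "### " &&
        PySem.Str.isIn ". " (((PySem.Str.split? briefing_text "\n").getD []).get i)) = true →
      PySem.Str.startswith (((PySem.Str.split? briefing_text "\n").getD []).get j) "**ADC RELEVANCE:" = true →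
      2 ≤ PySem.Str.count (((PySem.Str.split? briefing_text "\n").getD []).get j) "**"
instance (briefing_text : String) (max_stories : Int) : Decidable (Pre_parse_stories briefing_text max_stories) := by
  unfold Pre_parse_stories; infer_instance

def pvWitness_parse_stories : String × Int :=
  ("### 1. Big story\nSome body text.\n**ADC RELEVANCE:** - key point -\n**Source: web", 5)

def Spec_parse_stories (briefing_text : String) (max_stories : Int) (out : List (List (String × String))) : Prop := out = parse_stories_alt briefing_text max_stories
instance (briefing_text : String) (max_stories : Int) (out : List (List (String × String))) : Decidable (Spec_parse_stories briefing_text max_stories out) := by unfold Spec_parse_stories; infer_instance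

-- ===== CLAIM (what is proved, stated in full; the proofs are below) =====
def Claim_equal_parse_stories : Prop := ∀ (briefing_text : String) (max_stories : Int), Dom_parse_stories briefing_text max_stories → Pre_parse_stories briefing_text max_stories → Spec_parse_stories briefing_text max_stories (parse_stories briefing_text max_stories)

-- ===== LEMMAS AND PROOFS =====
theorem pvWitness_ok :
    Dom_parse_stories pvWitness_parse_stories.1 pvWitness_parse_stories.2 ∧
    Pre_parse_stories pvWitness_parse_stories.1 pvWitness_parse_stories.2 := by decide

-- the dict a story holds: keys are always exactly title, body, relevance in this order
def pvMk (t b r : String) : PySem.Dict String String := ⟨[("title", t), ("body", b), ("relevance", r)]⟩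

def pvDictOf (block : List String) : PySem.Dict String String := ⟨pvToStory block⟩

def pvClose (st : List (PySem.Dict String String) × Option (PySem.Dict String String)) :
    List (PySem.Dict String String) :=
  match st.2 with | some c => st.1 ++ [c] | none => st.1

theorem pvMk_init (t : String) :
    ((PySem.Dict.empty.insert "title" t).insert "body" "").insert "relevance" "" = pvMk t "" "" := by
  simp [pvMk, PySem.Dict.insert, PySem.Dict.empty, PySem.Dict.contains]

theorem pvMk_ins_rel (t b r v : String) : (pvMk t b r).insert "relevance" v = pvMk t b v := by
  simp [pvMk, PySem.Dict.insert, PySem.Dict.contains]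

theorem pvMk_ins_body (t b r v : String) : (pvMk t b r).insert "body" v = pvMk t v r := by
  simp [pvMk, PySem.Dict.insert, PySem.Dict.contains]

theorem pvMk_getD_body (t b r : String) : (pvMk t b r).getD "body" "" = b := by
  simp [pvMk, PySem.Dict.getD, PySem.Dict.get?]

theorem pvCharsJoinSnoc (l : List (List Char)) (x : List Char) :
    PySem.Chars.join [] (l ++ [x]) = PySem.Chars.join [] l ++ x := by
  induction l with
  | nil => simp [PySem.Chars.join_nil, PySem.Chars.join_singleton]
  | cons a t ih =>
    cases t with
    | nil => simp [PySem.Chars.join_singleton, PySem.Chars.join_cons_cons]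
    | cons b t2 =>
      simp only [List.cons_append, PySem.Chars.join_cons_cons] at ih ⊢
      rw [ih]; simp

theorem pvJoinSnoc (parts : List String) (x : String) :
    PySem.Str.join "" (parts ++ [x]) = PySem.Str.join "" parts ++ x := by
  simp [PySem.Str.join, pvCharsJoinSnoc, String.ofList_append]

theorem pvSliceMap {α β : Type} (xs : List α) (f : α → β) (a b : Option Int) :
    PySem.List.slice (xs.map f) a b = (PySem.List.slice xs a b).map f := by
  simp [PySem.List.slice, List.map_drop, List.map_take]

theorem pvDictOf_cons (h : String) (rest : List String) :
    pvDictOf (h :: rest) =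
      pvMk (pvTitleB h) (PySem.Str.join "" (rest.foldl pvClassify ("", [])).2)
        (rest.foldl pvClassify ("", [])).1 := rfl

-- A's in-place update of the current dict is B's classification step on the block's tail
theorem pvStepA_non_header (stories : List (PySem.Dict String String)) (h line : String)
    (rest : List String)
    (hh : (PySem.Str.startswith line "### " && PySem.Str.isIn ". " line) = false) :
    pvStepA (stories, some (pvDictOf (h :: rest))) line =
      (stories, some (pvDictOf (h :: (rest ++ [line])))) := by
  have hfold : ((rest ++ [line]).foldl pvClassify ("", [])) =
      pvClassify (rest.foldl pvClassify ("", [])) line := by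
    simp [List.foldl_append]
  rw [pvDictOf_cons, pvDictOf_cons, hfold]
  cases hp : rest.foldl pvClassify ("", []) with
  | mk r parts =>
    simp only [pvStepA, pvClassify, hh, Bool.false_eq_true, if_false]
    split_ifs with h1 h2 h3
    · simp [pvMk_ins_rel, pvRelA, pvRelB]
    · simp [pvMk_getD_body, pvMk_ins_body, pvJoinSnoc]
    · rfl
    · rfl

theorem pvAddLine_ne_nil (blocks : List (List String)) (line : String) (hne : blocks ≠ []) :
    pvAddLine blocks line ≠ [] := by
  unfold pvAddLine
  split_ifs with h1 h2
  · simp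
  · exact hne
  · simp

-- the block-building fold only touches the last block: a finished prefix passes through
theorem pvAddLine_shift (lines : List String) :
    ∀ (bs blocks : List (List String)), blocks ≠ [] →
      lines.foldl pvAddLine (bs ++ blocks) = bs ++ lines.foldl pvAddLine blocks := by
  induction lines with
  | nil => intro bs blocks _; simp
  | cons line ls ih =>
    intro bs blocks hne
    have hstep : pvAddLine (bs ++ blocks) line = bs ++ pvAddLine blocks line := by
      rcases List.eq_nil_or_concat blocks with rfl | ⟨ys, y, rfl⟩
      · exact absurd rfl hne
      · unfold pvAddLine
        split_ifs with h1 h2 h3 <;>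
          simp_all [← List.append_assoc]
    simp only [List.foldl_cons, hstep]
    exact ih _ _ (pvAddLine_ne_nil _ _ hne)

theorem pvLoopSome (lines : List String) :
    ∀ (stories : List (PySem.Dict String String)) (h : String) (rest : List String),
      pvClose (lines.foldl pvStepA (stories, some (pvDictOf (h :: rest)))) =
        stories ++ (lines.foldl pvAddLine [h :: rest]).map pvDictOf := by
  induction lines with
  | nil => intro stories h rest; simp [pvClose]
  | cons line ls ih =>
    intro stories h rest
    by_cases hh : (PySem.Str.startswith line "### " && PySem.Str.isIn ". " line) = true
    · have hstep : pvStepA (stories, some (pvDictOf (h :: rest))) line =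
          (stories ++ [pvDictOf (h :: rest)], some (pvDictOf [line])) := by
        simp only [pvStepA, hh, if_true]
        rw [pvMk_init]
        rfl
      have hbl : pvAddLine ([h :: rest] : List (List String)) line = [h :: rest] ++ [[line]] := by
        unfold pvAddLine pvIsHeader
        rw [hh]
        simp
      simp only [List.foldl_cons, hstep, hbl]
      rw [pvAddLine_shift ls [h :: rest] [[line]] (by simp), ih]
      simp
    · have hh' := eq_false_of_ne_true hh
      have hbl : pvAddLine ([h :: rest] : List (List String)) line = [h :: (rest ++ [line])] := by
        unfold pvAddLine pvIsHeader
        rw [hh']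
        simp
      simp only [List.foldl_cons, pvStepA_non_header stories h line rest hh', hbl]
      exact ih stories h (rest ++ [line])

theorem pvLoopNone (lines : List String) :
    pvClose (lines.foldl pvStepA ([], none)) = (lines.foldl pvAddLine []).map pvDictOf := by
  induction lines with
  | nil => simp [pvClose]
  | cons line ls ih =>
    by_cases hh : (PySem.Str.startswith line "### " && PySem.Str.isIn ". " line) = true
    · have hstep : pvStepA (([] : List (PySem.Dict String String)), none) line =
          ([], some (pvDictOf [line])) := by
        simp only [pvStepA, hh, if_true]
        rw [pvMk_init]
        rfl
      have hbl : pvAddLine ([] : List (List String)) line = [[line]] := by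
        unfold pvAddLine pvIsHeader
        rw [hh]
        simp
      simp only [List.foldl_cons, hstep, hbl]
      exact pvLoopSome ls [] line []
    · have hh' := eq_false_of_ne_true hh
      have hstep : pvStepA (([] : List (PySem.Dict String String)), none) line = ([], none) := by
        unfold pvStepA
        rw [hh']
        simp
      have hbl : pvAddLine ([] : List (List String)) line = [] := by
        unfold pvAddLine pvIsHeader
        rw [hh']
        simp
      simp only [List.foldl_cons, hstep, hbl]
      exact ih

-- ===== VERDICT (by name: the statement is the Claim_ definition above) =====
theorem parse_stories_spec : Claim_equal_parse_stories := by
  intro briefing_text max_stories _ _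
  show parse_stories briefing_text max_stories = parse_stories_alt briefing_text max_stories
  have h := pvLoopNone ((PySem.Str.split? briefing_text "\n").getD [])
  unfold parse_stories parse_stories_alt
  rcases hf : List.foldl pvStepA ([], none) ((PySem.Str.split? briefing_text "\n").getD []) with ⟨s, c⟩
  rw [hf] at h
  cases c with
  | none =>
    simp only [pvClose] at h
    simp only [h, pvSliceMap, List.map_map]
    rfl
  | some d =>
    simp only [pvClose] at h
    simp only [h, pvSliceMap, List.map_map]
    rfl
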